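-- pv_equiv track=rewrite | github.com/limit5/OmniSight-Productizer | backend/web/vite_error_relay.py | vite_error_history_signature
-- ===== SOURCE A (Python) =====
-- from typing import Any, Iterable, Sequence
--
-- def vite_error_history_signature(formatted: Sequence[str]) -> tuple[str, ...]:
--     """Stable signature of a list of formatted Vite history entries
--     suitable for the W15.4 3-strike retry-budget pattern detector.
--
--     The signature is the tuple of the leading
--     ``vite[<phase>] <file>:<line>: <kind>:`` heads — the message
--     body is dropped so a single error pattern that recurs with
--     slightly different wording (e.g. ``"foo is not defined"`` and
--     ``"'foo' is not defined"`` both reduce to the same head if the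
--     file/line/phase/kind match) collapses to one bucket.
--
--     W15.4 will compare the most-recent N signatures and escalate to
--     operator when the same head appears 3+ times consecutively.
--     Returning ``tuple`` (not ``list``) so the result is hashable
--     and can sit directly in W15.4's ``Counter``-based budget
--     accumulator without an extra ``tuple()`` cast.
--     """
--
--     out: list[str] = []
--     for entry in formatted:
--         if not isinstance(entry, str):
--             raise TypeError(
--                 f"formatted entries must be str, got {type(entry).__name__}"
--             )
--         # Head ends after the second ":" because the format is
--         # ``vite[<phase>] <file>:<line>: <kind>: <message>``.
--         # Walk through the colons preserving the bracketed phase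
--         # (which itself contains no colons by construction —
--         # ``VITE_ERROR_ALLOWED_PHASES`` are alphanumeric).
--         head_end = -1
--         colons_seen = 0
--         for idx, ch in enumerate(entry):
--             if ch == ":":
--                 colons_seen += 1
--                 if colons_seen == 3:
--                     head_end = idx + 1
--                     break
--         if head_end <= 0:
--             # Degraded entry that does not match the W15.2 format
--             # (e.g. a pathological filename that exhausted the byte
--             # cap before the body).  Use the entire entry as the
--             # signature so two such entries still bucket together
--             # when identical.
--             out.append(entry)
--         else:
--             out.append(entry[:head_end])
--     return tuple(out)
-- ===== SOURCE B (Python) =====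
-- from typing import Sequence
--
--
-- def _head(entry) -> str:
--     if not isinstance(entry, str):
--         raise TypeError(
--             f"formatted entries must be str, got {type(entry).__name__}"
--         )
--     parts = entry.split(":", 3)
--     if len(parts) < 4:
--         # fewer than three colons: degraded entry, keep it whole
--         return entry
--     return ":".join(parts[:3]) + ":"
--
--
-- def vite_error_history_signature(formatted: Sequence[str]) -> tuple[str, ...]:
--     return tuple(_head(entry) for entry in formatted)
-- ===== Notes on version B (the rewrite author's own statement) =====
-- stated objective: idiomatic
-- what changed: Replaced the manual indexed character scan that counts colons and slices at the computed position by a segment partition with str.split(':', 3) followed by reassembly of the first three segments, applied per entry through a helper and a comprehension.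
import Mathlib
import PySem

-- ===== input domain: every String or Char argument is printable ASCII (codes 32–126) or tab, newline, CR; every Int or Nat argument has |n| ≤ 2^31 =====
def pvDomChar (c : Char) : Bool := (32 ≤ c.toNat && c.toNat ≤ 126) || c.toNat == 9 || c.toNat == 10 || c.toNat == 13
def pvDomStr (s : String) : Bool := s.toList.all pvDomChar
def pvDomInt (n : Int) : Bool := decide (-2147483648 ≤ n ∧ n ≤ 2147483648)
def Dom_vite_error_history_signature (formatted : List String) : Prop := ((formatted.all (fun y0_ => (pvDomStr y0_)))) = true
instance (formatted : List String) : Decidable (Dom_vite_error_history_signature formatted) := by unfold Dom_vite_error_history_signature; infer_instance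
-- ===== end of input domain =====

-- B replaces A's positional colon-counting scan by split(':', 3) and reassembly of the first
-- three segments (idiomatic); equal return value on every input (the TypeError branch is
-- unreachable for List String).

-- ===== PORT A =====
-- inner loop of A: walk the characters with their index, counting colons; head_end = idx+1
-- at the third colon, -1 if the loop finishes without one (the break).
def pvAHead : List Char → Int → Nat → Int
  | [], _, _ => -1
  | c :: rest, idx, colons =>
    if c = ':' then
      if colons + 1 = 3 then idx + 1
      else pvAHead rest (idx + 1) (colons + 1)
    else pvAHead rest (idx + 1) colons

-- per-entry body of A's for-loop: degraded branch keeps the entry, else entry[:head_end]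
def pvAEntry (entry : String) : String :=
  let head_end := pvAHead entry.toList 0 0
  if head_end ≤ 0 then entry else PySem.Str.slice entry none (some head_end)

def vite_error_history_signature (formatted : List String) : List String :=
  formatted.foldl (fun out entry => out ++ [pvAEntry entry]) []

-- ===== PORT B =====
-- per-entry helper _head of Source B: parts = entry.split(':', 3); whole entry if fewer than
-- four parts, else ':'.join(parts[:3]) + ':'  (sep ":" is nonempty, so split cannot raise:
-- Chars.splitOnMax is exactly that case of splitMax?)
def pvBHead (entry : String) : String :=
  let parts := PySem.Chars.splitOnMax entry.toList [':'] 3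
  if parts.length < 4 then entry
  else String.ofList (PySem.Chars.join [':'] (PySem.List.slice parts none (some 3)) ++ [':'])

def vite_error_history_signature_alt (formatted : List String) : List String :=
  formatted.map pvBHead

-- ===== PRECONDITION & SPEC =====
def Spec_vite_error_history_signature (formatted : List String) (out : List String) : Prop := out = vite_error_history_signature_alt formatted
instance (formatted : List String) (out : List String) : Decidable (Spec_vite_error_history_signature formatted out) := by unfold Spec_vite_error_history_signature; infer_instance

-- ===== CLAIM (what is proved, stated in full; the proofs are below) =====
def Claim_equal_vite_error_history_signature : Prop := ∀ (formatted : List String), Dom_vite_error_history_signature formatted → Spec_vite_error_history_signature formatted (vite_error_history_signature formatted)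

-- ===== LEMMAS AND PROOFS =====

-- length of the prefix of cs up to and including its k-th colon (none if < k colons)
def pvHeadLen : Nat → List Char → Option Nat
  | _, [] => none
  | k, c :: cs =>
    if c = ':' then
      if k = 1 then some 1 else (pvHeadLen (k - 1) cs).map (· + 1)
    else (pvHeadLen k cs).map (· + 1)

-- fuel-free form of PySem.Chars.splitOnMax.go for the single-character separator ':'
def pvClean : Nat → List Char → List Char → List (List Char)
  | _, [], cur => [cur.reverse]
  | 0, l, cur => [cur.reverse ++ l]
  | m + 1, c :: rest, cur =>
    if c = ':' then cur.reverse :: pvClean m rest [] else pvClean (m + 1) rest (c :: cur)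

theorem pvHeadLen_pos {k : Nat} {cs : List Char} {n : Nat} (h : pvHeadLen k cs = some n) : 1 ≤ n := by
  induction cs generalizing k n with
  | nil => simp [pvHeadLen] at h
  | cons c cs ih =>
    simp only [pvHeadLen] at h
    split_ifs at h with h1 h2
    · simp at h; omega
    · rw [Option.map_eq_some_iff] at h
      obtain ⟨m, _, hm⟩ := h; omega
    · rw [Option.map_eq_some_iff] at h
      obtain ⟨m, _, hm⟩ := h; omega

theorem pvAHead_eq (cs : List Char) (idx : Int) (k : Nat) (hk : k < 3) :
    pvAHead cs idx k = match pvHeadLen (3 - k) cs with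
      | none => -1
      | some n => idx + n := by
  induction cs generalizing idx k with
  | nil => simp [pvAHead, pvHeadLen]
  | cons c cs ih =>
    by_cases hc : c = ':'
    · by_cases h3 : k + 1 = 3
      · have hk2 : k = 2 := by omega
        subst hk2; subst hc
        simp [pvAHead, pvHeadLen]
      · have hlt : k + 1 < 3 := by omega
        have := ih (idx + 1) (k + 1) hlt
        have hsub : 3 - (k + 1) = (3 - k) - 1 := by omega
        have hne1 : 3 - k ≠ 1 := by omega
        simp only [pvAHead, hc, if_pos rfl, if_neg h3, this, hsub]
        simp only [pvHeadLen, if_pos rfl, if_neg hne1]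
        cases h : pvHeadLen (3 - k - 1) cs with
        | none => simp
        | some n => simp; push_cast; ring
    · have := ih (idx + 1) k hk
      simp only [pvAHead, hc, if_neg hc, this]
      simp only [pvHeadLen, if_neg hc]
      cases h : pvHeadLen (3 - k) cs with
      | none => simp
      | some n => simp; push_cast; ring

theorem pvClean_ne_nil (m : Nat) (cs cur : List Char) : pvClean m cs cur ≠ [] := by
  induction m, cs, cur using pvClean.induct
  all_goals simp_all [pvClean]

theorem pvGo_eq_clean (cs : List Char) (fuel m : Nat) (cur : List Char) (acc : List (List Char))
    (h : cs.length < fuel) :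
    PySem.Chars.splitOnMax.go [':'] fuel m cs cur acc = acc.reverse ++ pvClean m cs cur := by
  induction fuel generalizing cs m cur acc with
  | zero => omega
  | succ fuel ih =>
    cases cs with
    | nil => simp [PySem.Chars.splitOnMax.go, pvClean]
    | cons c rest =>
      cases m with
      | zero => simp [PySem.Chars.splitOnMax.go, pvClean]
      | succ m =>
        by_cases hc : c = ':'
        · subst hc
          have hpre : List.isPrefixOf [':'] (':' :: rest) = true := by
            simp [List.isPrefixOf]
          simp only [PySem.Chars.splitOnMax.go, hpre, if_neg (Nat.succ_ne_zero m)]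
          simp only [Nat.add_sub_cancel, List.length_cons, List.drop_succ_cons, List.length_nil,
            List.drop_zero, if_true]
          rw [ih rest m [] (cur.reverse :: acc) (by simp at h; omega)]
          simp [pvClean]
        · have hpre : List.isPrefixOf [':'] (c :: rest) = false := by
            simp only [List.isPrefixOf, Bool.and_eq_false_iff, beq_eq_false_iff_ne, ne_eq]
            exact Or.inl fun h' => hc h'.symm
          simp only [PySem.Chars.splitOnMax.go, hpre, if_neg (Nat.succ_ne_zero m)]
          rw [ih rest (m + 1) (c :: cur) acc (by simp at h; omega)]
          simp [pvClean, hc]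

theorem pvMain (cs : List Char) (k : Nat) (cur : List Char) (hk : 1 ≤ k) :
    match pvHeadLen k cs with
    | none => (pvClean k cs cur).length < k + 1
    | some n => (pvClean k cs cur).length = k + 1 ∧
        PySem.Chars.join [':'] ((pvClean k cs cur).take k) ++ [':'] = cur.reverse ++ cs.take n := by
  induction cs generalizing k cur with
  | nil =>
    simp only [pvHeadLen, pvClean]
    simp; omega
  | cons c cs ih =>
    obtain ⟨m, rfl⟩ : ∃ m, k = m + 1 := ⟨k - 1, by omega⟩
    by_cases hc : c = ':'
    · subst hc
      by_cases h1 : m + 1 = 1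
      · have hm0 : m = 0 := by omega
        subst hm0
        have hclean0 : pvClean 0 cs [] = [cs] := by cases cs <;> simp [pvClean]
        simp only [pvHeadLen, if_pos rfl, if_pos rfl, pvClean, hclean0]
        simp [PySem.Chars.join_singleton]
      · have hm : 1 ≤ m := by omega
        have IH := ih m [] hm
        simp only [pvHeadLen, if_pos rfl, if_neg h1, Nat.add_sub_cancel]
        simp only [pvClean, if_pos rfl]
        cases hh : pvHeadLen m cs with
        | none =>
          rw [hh] at IH
          simp only [hh, Option.map_none]
          simp
          omega
        | some n =>
          rw [hh] at IH
          obtain ⟨IHlen, IHjoin⟩ := IH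
          simp only [hh, Option.map_some]
          constructor
          · simp
            omega
          · obtain ⟨p, ps, hp⟩ : ∃ p ps, pvClean m cs [] = p :: ps := by
              cases hcl : pvClean m cs [] with
              | nil => exact absurd hcl (pvClean_ne_nil m cs [])
              | cons p ps => exact ⟨p, ps, rfl⟩
            have htake : (cur.reverse :: pvClean m cs []).take (m + 1)
                = cur.reverse :: p :: ps.take (m - 1) := by
              rw [hp]; simp [List.take_succ_cons]
              congr 1
              obtain ⟨m', rfl⟩ : ∃ m', m = m' + 1 := ⟨m - 1, by omega⟩
              simp [List.take_succ_cons]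
            have htake' : (pvClean m cs []).take m = p :: ps.take (m - 1) := by
              rw [hp]
              obtain ⟨m', rfl⟩ : ∃ m', m = m' + 1 := ⟨m - 1, by omega⟩
              simp [List.take_succ_cons]
            simp only [if_true, ite_true]
            rw [htake, PySem.Chars.join_cons_cons]
            rw [htake'] at IHjoin
            simp only [List.reverse_nil, List.nil_append] at IHjoin
            simp [IHjoin]
    · have IH := ih (m + 1) (c :: cur) hk
      simp only [pvHeadLen, if_neg hc]
      simp only [pvClean, if_neg hc]
      cases hh : pvHeadLen (m + 1) cs with
      | none =>
        rw [hh] at IH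
        simpa using IH
      | some n =>
        rw [hh] at IH
        obtain ⟨IHlen, IHjoin⟩ := IH
        simp only [hh, Option.map_some]
        refine ⟨IHlen, ?_⟩
        rw [IHjoin]
        simp

theorem pvEntry_eq (e : String) : pvAEntry e = pvBHead e := by
  unfold pvAEntry pvBHead
  have hgo : PySem.Chars.splitOnMax e.toList [':'] 3 = pvClean 3 e.toList [] := by
    unfold PySem.Chars.splitOnMax
    rw [if_neg (by omega)]
    have := pvGo_eq_clean e.toList (e.toList.length + 1) 3 [] [] (by omega)
    simpa using this
  have hA := pvAHead_eq e.toList 0 0 (by omega)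
  have hM := pvMain e.toList 3 [] (by omega)
  rw [hgo]
  cases hh : pvHeadLen 3 e.toList with
  | none =>
    rw [hh] at hA hM
    simp only at hA hM
    rw [hA]
    simp only [List.reverse_nil]
    rw [if_pos (by omega : (-1 : Int) ≤ 0), if_pos hM]
  | some n =>
    rw [hh] at hA hM
    simp only at hA hM
    obtain ⟨hMlen, hMjoin⟩ := hM
    have hn : 1 ≤ n := pvHeadLen_pos hh
    rw [hA]
    rw [if_neg (by omega : ¬ ((0 : Int) + n ≤ 0)), if_neg (by omega)]
    apply String.toList_inj.mp
    simp only [PySem.Str.slice, String.toList_ofList, PySem.Chars.slice_eq_listSlice]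
    rw [PySem.List.slice_to _ (by omega : (0:Int) ≤ 0 + (n:Int)),
        PySem.List.slice_to _ (by omega : (0:Int) ≤ 3)]
    have h3 : ((3 : Int)).toNat = 3 := rfl
    have hn' : ((0 : Int) + (n : Int)).toNat = n := by omega
    rw [h3, hn', hMjoin]
    simp

-- ===== VERDICT (by name: the statement is the Claim_ definition above) =====
theorem vite_error_history_signature_spec : Claim_equal_vite_error_history_signature := by
  intro formatted _
  show _ = _
  unfold vite_error_history_signature vite_error_history_signature_alt
  have h : ∀ (l : List String) (acc : List String),
      l.foldl (fun out entry => out ++ [pvAEntry entry]) acc = acc ++ l.map pvBHead := by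
    intro l
    induction l with
    | nil => intro acc; simp
    | cons x xs ih => intro acc; rw [List.foldl_cons, ih]; simp [pvEntry_eq]
  simpa using h formatted []
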